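-- pv_equiv track=rewrite | github.com/czak/aoc | 2018/python/day5.py | find_reactions
-- ===== SOURCE A (Python) =====
-- def good_pair(l1, l2):
--     return (l1 in range(65, 91) and l2 == l1 + 32) or (l1 in range(97, 123) and l2 == l1 - 32)
--
-- def find_reactions(a):
--     reactions = []
--     for i in range(len(a)-1):
--         if len(reactions) > 0 and reactions[-1] == i - 1:
--             continue
--         if good_pair(a[i], a[i+1]):
--             reactions.append(i)
--     return reactions
-- ===== SOURCE B (Python) =====
-- def good_pair(l1, l2):
--     return (l1 in range(65, 91) and l2 == l1 + 32) or (l1 in range(97, 123) and l2 == l1 - 32)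
--
-- def find_reactions(a):
--     # Stage 1: boolean mask of all reacting adjacent pairs, independent of any selection.
--     cand = [good_pair(a[i], a[i + 1]) for i in range(len(a) - 1)]
--     # Stage 2: within each maximal run of consecutive candidates keep every other one,
--     # decided by the run-length parity (streak), not by greedy skipping.
--     reactions = []
--     streak = 0
--     for i, c in enumerate(cand):
--         streak = streak + 1 if c else 0
--         if streak % 2 == 1:
--             reactions.append(i)
--     return reactions
-- ===== Notes on version B (the rewrite author's own statement) =====
-- stated objective: alternative
-- what changed: Replaces the greedy pass that skips an index via a lookback into the output list (reactions[-1] == i-1) with two stages: first a selection-independent boolean mask of all reacting adjacent pairs, then a run-length-parity (streak) selection that keeps every other index inside each maximal candidate run.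
import Mathlib
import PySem

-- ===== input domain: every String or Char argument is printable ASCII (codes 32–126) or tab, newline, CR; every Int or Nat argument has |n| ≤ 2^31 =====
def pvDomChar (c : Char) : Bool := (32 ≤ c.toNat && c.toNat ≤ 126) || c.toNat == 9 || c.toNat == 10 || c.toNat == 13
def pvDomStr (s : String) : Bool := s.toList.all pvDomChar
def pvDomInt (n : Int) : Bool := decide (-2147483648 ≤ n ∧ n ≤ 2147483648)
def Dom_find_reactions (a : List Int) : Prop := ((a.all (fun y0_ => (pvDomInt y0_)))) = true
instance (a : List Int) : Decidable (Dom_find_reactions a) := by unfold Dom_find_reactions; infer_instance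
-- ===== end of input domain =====

-- B replaces A's greedy pass with its lookback into the output list (reactions[-1] == i-1)
-- by two stages: a selection-independent candidate mask, then run-length-parity selection.

-- ===== PORT A =====
def good_pair (l1 l2 : Int) : Bool :=
  (65 ≤ l1 && l1 < 91 && l2 == l1 + 32) || (97 ≤ l1 && l1 < 123 && l2 == l1 - 32)

def stepA (a : List Int) (acc : List Int) (i : Nat) : List Int :=
  if 0 < acc.length ∧ PySem.List.pyGet? acc (-1) = some ((i : Int) - 1) then acc
  else if good_pair (PySem.List.pyGetD a (i : Int) 0) (PySem.List.pyGetD a ((i : Int) + 1) 0)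
  then acc ++ [(i : Int)] else acc

def find_reactions (a : List Int) : List Int :=
  (List.range (a.length - 1)).foldl (stepA a) []

-- ===== PORT B =====
-- stage-2 loop body: update the streak, keep the index when the streak is odd
def stepB (st : Nat × List Int) (p : Int × Bool) : Nat × List Int :=
  let streak := if p.2 then st.1 + 1 else 0
  (streak, if streak % 2 = 1 then st.2 ++ [p.1] else st.2)

def find_reactions_alt (a : List Int) : List Int :=
  let cand := (List.range (a.length - 1)).map
    (fun (i : Nat) => good_pair (PySem.List.pyGetD a (i : Int) 0) (PySem.List.pyGetD a ((i : Int) + 1) 0))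
  ((PySem.List.enumerate cand 0).foldl stepB (0, [])).2

-- ===== PRECONDITION & SPEC =====
def Spec_find_reactions (a : List Int) (out : List Int) : Prop := out = find_reactions_alt a
instance (a : List Int) (out : List Int) : Decidable (Spec_find_reactions a out) := by unfold Spec_find_reactions; infer_instance

-- ===== CLAIM (what is proved, stated in full; the proofs are below) =====
def Claim_equal_find_reactions : Prop := ∀ (a : List Int), Dom_find_reactions a → Spec_find_reactions a (find_reactions a)

-- ===== LEMMAS AND PROOFS =====

-- proof-only reference function: cursor recursion both ports are reduced to
def altGo (a : List Int) (i : Nat) : List Int :=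
  if h : i + 1 < a.length then
    if good_pair (PySem.List.pyGetD a (i : Int) 0) (PySem.List.pyGetD a ((i : Int) + 1) 0)
    then (i : Int) :: altGo a (i + 2)
    else altGo a (i + 1)
  else []
termination_by a.length - i
decreasing_by all_goals omega

-- A-side invariant: every element appended so far is ≤ i - 2, so A's skip test is false at i.
theorem keyA (a : List Int) : ∀ k i acc, a.length - 1 = i + k →
    (∀ v, acc.getLast? = some v → v + 2 ≤ (i : Int)) →
    (List.range' i k).foldl (stepA a) acc = acc ++ altGo a i := by
  intro k
  induction k using Nat.strong_induction_on with
  | _ k ih =>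
    intro i acc hk H
    match k with
    | 0 =>
      rw [altGo]
      have : ¬ (i + 1 < a.length) := by omega
      simp [this]
    | k' + 1 =>
      have hi1 : i + 1 < a.length := by omega
      have hskip : ¬ (0 < acc.length ∧ PySem.List.pyGet? acc (-1) = some ((i : Int) - 1)) := by
        rintro ⟨-, hlast⟩
        rw [PySem.List.pyGet?_neg_one] at hlast
        have := H _ hlast
        omega
      rw [List.range'_succ, List.foldl_cons, altGo]
      simp only [hi1, dif_pos]
      by_cases hg : good_pair (PySem.List.pyGetD a (i : Int) 0) (PySem.List.pyGetD a ((i : Int) + 1) 0) = true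
      · rw [if_pos hg]
        have hstep : stepA a acc i = acc ++ [(i : Int)] := by
          rw [stepA, if_neg hskip, if_pos hg]
        rw [hstep]
        match k' with
        | 0 =>
          rw [altGo]
          have : ¬ (i + 2 + 1 < a.length) := by omega
          simp [this]
        | k'' + 1 =>
          rw [List.range'_succ, List.foldl_cons]
          have hskip2 : stepA a (acc ++ [(i : Int)]) (i + 1) = acc ++ [(i : Int)] := by
            have : PySem.List.pyGet? (acc ++ [(i : Int)]) (-1) = some (((i : Nat) + 1 : Int) - 1) := by
              rw [PySem.List.pyGet?_neg_one_append_singleton]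
              norm_num
            simp [stepA, this]
          rw [hskip2]
          have := ih k'' (by omega) (i + 2) (acc ++ [(i : Int)]) (by omega)
            (by
              intro v hv
              simp at hv
              push_cast
              omega)
          rw [show i + 1 + 1 = i + 2 by omega, this, List.append_assoc]
          simp
      · rw [if_neg hg]
        have hstep : stepA a acc i = acc := by
          rw [stepA, if_neg hskip, if_neg hg]
        rw [hstep]
        exact ih k' (by omega) (i + 1) acc (by omega)
          (by intro v hv; have := H _ hv; push_cast; omega)

-- bring B's fold over the enumerated mask to a fold over the index range
theorem enum_map_range' (f : Nat → Bool) :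
    ∀ (k i : Nat) (st : Nat × List Int),
    (PySem.List.enumerate ((List.range' i k).map f) (i : Int)).foldl stepB st =
      (List.range' i k).foldl (fun (st : Nat × List Int) (j : Nat) => stepB st ((j : Int), f j)) st := by
  intro k
  induction k with
  | zero => intro i st; simp [PySem.List.enumerate_nil]
  | succ k ih =>
    intro i st
    rw [List.range'_succ, List.map_cons, PySem.List.enumerate_cons, List.foldl_cons,
        List.foldl_cons]
    have := ih (i + 1) (stepB st ((i : Int), f i))
    push_cast at this ⊢
    exact this

-- B-side invariant: with an even streak the remaining fold produces altGo a i;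
-- with an odd streak the index is skipped and the fold produces altGo a (i+1).
theorem keyB (a : List Int) : ∀ k i acc streak, a.length - 1 = i + k →
    ((List.range' i k).foldl
        (fun (st : Nat × List Int) (j : Nat) => stepB st ((j : Int),
          good_pair (PySem.List.pyGetD a (j : Int) 0) (PySem.List.pyGetD a ((j : Int) + 1) 0)))
        (streak, acc)).2 =
      if streak % 2 = 0 then acc ++ altGo a i else acc ++ altGo a (i + 1) := by
  intro k
  induction k with
  | zero =>
    intro i acc streak hk
    have h1 : ¬ (i + 1 < a.length) := by omega
    have h2 : ¬ (i + 1 + 1 < a.length) := by omega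
    have e1 : altGo a i = [] := by rw [altGo]; exact dif_neg h1
    have e2 : altGo a (i + 1) = [] := by rw [altGo]; exact dif_neg h2
    rw [List.range'_zero, List.foldl_nil, e1, e2]
    by_cases hp : streak % 2 = 0
    · rw [if_pos hp]; simp
    · rw [if_neg hp]; simp
  | succ k ih =>
    intro i acc streak hk
    have hi1 : i + 1 < a.length := by omega
    rw [List.range'_succ, List.foldl_cons]
    by_cases hg : good_pair (PySem.List.pyGetD a (i : Int) 0) (PySem.List.pyGetD a ((i : Int) + 1) 0) = true
    · by_cases hp : streak % 2 = 0
      · -- even streak, candidate: emit i, streak becomes odd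
        have hstep : stepB (streak, acc) ((i : Int),
            good_pair (PySem.List.pyGetD a (i : Int) 0) (PySem.List.pyGetD a ((i : Int) + 1) 0))
            = (streak + 1, acc ++ [(i : Int)]) := by
          rw [stepB]
          rw [if_pos hg, if_pos (show (streak + 1) % 2 = 1 by omega)]
        rw [hstep, ih (i + 1) (acc ++ [(i : Int)]) (streak + 1) (by omega)]
        rw [if_neg (show ¬ ((streak + 1) % 2 = 0) by omega), if_pos hp]
        have eg : altGo a i = (i : Int) :: altGo a (i + 2) := by
          rw [altGo, dif_pos hi1, if_pos hg]
        rw [eg, show i + 1 + 1 = i + 2 by omega]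
        simp
      · -- odd streak, candidate: skip i, streak becomes even
        have hstep : stepB (streak, acc) ((i : Int),
            good_pair (PySem.List.pyGetD a (i : Int) 0) (PySem.List.pyGetD a ((i : Int) + 1) 0))
            = (streak + 1, acc) := by
          rw [stepB]
          rw [if_pos hg, if_neg (show ¬ ((streak + 1) % 2 = 1) by omega)]
        rw [hstep, ih (i + 1) acc (streak + 1) (by omega)]
        rw [if_pos (show (streak + 1) % 2 = 0 by omega), if_neg hp]
    · -- no candidate: streak resets to 0 (even), no emit
      have hg' : good_pair (PySem.List.pyGetD a (i : Int) 0) (PySem.List.pyGetD a ((i : Int) + 1) 0) = false := by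
        exact Bool.eq_false_iff.mpr hg
      have hstep : stepB (streak, acc) ((i : Int),
          good_pair (PySem.List.pyGetD a (i : Int) 0) (PySem.List.pyGetD a ((i : Int) + 1) 0))
          = (0, acc) := by
        rw [stepB]
        rw [hg']
        rfl
      rw [hstep, ih (i + 1) acc 0 (by omega)]
      rw [if_pos (show (0 : Nat) % 2 = 0 by omega)]
      by_cases hp : streak % 2 = 0
      · rw [if_pos hp]
        have eg : altGo a i = altGo a (i + 1) := by
          rw [altGo, dif_pos hi1, if_neg hg]
        rw [eg]
      · rw [if_neg hp]

-- ===== VERDICT (by name: the statement is the Claim_ definition above) =====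
theorem find_reactions_spec : Claim_equal_find_reactions := by
  intro a _
  unfold Spec_find_reactions find_reactions find_reactions_alt
  rw [List.range_eq_range']
  have hA := keyA a (a.length - 1) 0 [] (by omega) (by simp)
  have henum := enum_map_range'
    (fun i => good_pair (PySem.List.pyGetD a (i : Int) 0) (PySem.List.pyGetD a ((i : Int) + 1) 0))
    (a.length - 1) 0 (0, [])
  have hB := keyB a (a.length - 1) 0 [] 0 (by omega)
  simp only [Nat.cast_zero] at henum
  simp only [henum, hB]
  simpa using hA
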